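-- pv_equiv track=rewrite | github.com/posl/comment_recommendation | script/mod_gen/3_time/zh/241_C/2.py | check
-- ===== SOURCE A (Python) =====
-- def check(grid):
--     # 检查是否存在6个连续的黑色方块
--     n = len(grid)
--     for i in range(n):
--         for j in range(n):
--             if grid[i][j] == '#':
--                 if i + 5 < n and grid[i + 1][j] == '#' and grid[i + 2][j] == '#' and grid[i + 3][j] == '#' and grid[i + 4][j] == '#' and grid[i + 5][j] == '#':
--                     return True
--                 if j + 5 < n and grid[i][j + 1] == '#' and grid[i][j + 2] == '#' and grid[i][j + 3] == '#' and grid[i][j + 4] == '#' and grid[i][j + 5] == '#':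
--                     return True
--                 if i + 5 < n and j + 5 < n and grid[i + 1][j + 1] == '#' and grid[i + 2][j + 2] == '#' and grid[i + 3][j + 3] == '#' and grid[i + 4][j + 4] == '#' and grid[i + 5][j + 5] == '#':
--                     return True
--                 if i + 5 < n and j - 5 >= 0 and grid[i + 1][j - 1] == '#' and grid[i + 2][j - 2] == '#' and grid[i + 3][j - 3] == '#' and grid[i + 4][j - 4] == '#' and grid[i + 5][j - 5] == '#':
--                     return True
--     return False
-- ===== SOURCE B (Python) =====
-- def check(grid):
--     # Single row-major pass: per-cell run-length counters for the four
--     # directions (horizontal, vertical, both diagonals), carried from the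
--     # previously computed neighbour; a run of 6 is detected at its end.
--     n = len(grid)
--     prev = [(0, 0, 0)] * n
--     found = False
--     for i in range(n):
--         cur = []
--         h = 0
--         for j in range(n):
--             if grid[i][j] == '#':
--                 h += 1
--                 vt = prev[j][0] + 1
--                 d1 = (prev[j - 1][1] if j > 0 else 0) + 1
--                 d2 = (prev[j + 1][2] if j + 1 < n else 0) + 1
--                 if h >= 6 or vt >= 6 or d1 >= 6 or d2 >= 6:
--                     found = True
--                 cur.append((vt, d1, d2))
--             else:
--                 h = 0
--                 cur.append((0, 0, 0))
--         prev = cur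
--     return found
-- ===== Notes on version B (the rewrite author's own statement) =====
-- stated objective: alternative
-- what changed: Replaces A's per-cell probing of four explicit 6-cell windows by a single row-major dynamic-programming pass that carries run-length counters (horizontal, vertical, both diagonals) from already-computed neighbours and flags a run of 6 at its end.
-- outside the precondition, e.g. on check([['#'], ['#'], ['#'], ['#'], ['#'], ['#']]): A returns True, B raises IndexError
import Mathlib
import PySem

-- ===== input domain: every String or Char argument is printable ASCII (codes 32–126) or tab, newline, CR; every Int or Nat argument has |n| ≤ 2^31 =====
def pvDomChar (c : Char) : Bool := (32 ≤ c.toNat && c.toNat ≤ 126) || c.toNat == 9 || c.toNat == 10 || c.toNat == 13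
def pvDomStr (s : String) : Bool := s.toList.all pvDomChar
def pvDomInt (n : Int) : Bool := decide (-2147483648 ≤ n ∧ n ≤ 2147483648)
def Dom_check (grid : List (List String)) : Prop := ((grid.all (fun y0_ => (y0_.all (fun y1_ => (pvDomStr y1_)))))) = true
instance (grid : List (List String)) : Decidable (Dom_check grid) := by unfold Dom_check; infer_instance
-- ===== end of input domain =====

-- B detects the same 6-in-a-row condition by one dynamic-programming pass with
-- per-cell run-length counters instead of A's per-cell probing of four 6-cell
-- windows (objective: alternative algorithm of the same cost).

-- ===== PORT A =====
-- grid[i][j]: exact for the nonnegative in-range indices used under Pre_check.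
def pvCell (g : List (List String)) (i j : Nat) : String := (g.getD i []).getD j ""

-- the body of A's inner loop at (i, j): the four sequential 'if … return True' tests
def pvHitA (g : List (List String)) (n i j : Nat) : Bool :=
  if pvCell g i j == "#" then
    if decide (i + 5 < n) && (pvCell g (i+1) j == "#") && (pvCell g (i+2) j == "#") &&
       (pvCell g (i+3) j == "#") && (pvCell g (i+4) j == "#") && (pvCell g (i+5) j == "#") then true
    else if decide (j + 5 < n) && (pvCell g i (j+1) == "#") && (pvCell g i (j+2) == "#") &&
       (pvCell g i (j+3) == "#") && (pvCell g i (j+4) == "#") && (pvCell g i (j+5) == "#") then true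
    else if decide (i + 5 < n) && decide (j + 5 < n) && (pvCell g (i+1) (j+1) == "#") &&
       (pvCell g (i+2) (j+2) == "#") && (pvCell g (i+3) (j+3) == "#") &&
       (pvCell g (i+4) (j+4) == "#") && (pvCell g (i+5) (j+5) == "#") then true
    else if decide (i + 5 < n) && decide (5 ≤ j) && (pvCell g (i+1) (j-1) == "#") &&
       (pvCell g (i+2) (j-2) == "#") && (pvCell g (i+3) (j-3) == "#") &&
       (pvCell g (i+4) (j-4) == "#") && (pvCell g (i+5) (j-5) == "#") then true
    else false
  else false

def check (grid : List (List String)) : Bool :=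
  let n := grid.length
  (List.range n).any (fun i => (List.range n).any (fun j => pvHitA grid n i j))

-- ===== PORT B =====
-- inner loop of Source B: state (found, h, cur); prev is the previous row's counters
def pvInner (g : List (List String)) (n i : Nat) (prev : List (Nat × Nat × Nat))
    (st : Bool × Nat × List (Nat × Nat × Nat)) (j : Nat) : Bool × Nat × List (Nat × Nat × Nat) :=
  let (found, h, cur) := st
  if pvCell g i j == "#" then
    let h' := h + 1
    let vt := (prev.getD j (0,0,0)).1 + 1
    let d1 := (if 0 < j then (prev.getD (j-1) (0,0,0)).2.1 else 0) + 1
    let d2 := (if j + 1 < n then (prev.getD (j+1) (0,0,0)).2.2 else 0) + 1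
    ((found || decide (6 ≤ h') || decide (6 ≤ vt) || decide (6 ≤ d1) || decide (6 ≤ d2)),
     h', cur ++ [(vt, d1, d2)])
  else (found, 0, cur ++ [(0,0,0)])

-- outer loop of Source B: state (found, prev)
def pvOuter (g : List (List String)) (n : Nat)
    (st : Bool × List (Nat × Nat × Nat)) (i : Nat) : Bool × List (Nat × Nat × Nat) :=
  let r := (List.range n).foldl (pvInner g n i st.2) (st.1, 0, [])
  (r.1, r.2.2)

def check_alt (grid : List (List String)) : Bool :=
  let n := grid.length
  ((List.range n).foldl (pvOuter grid n) (false, List.replicate n (0,0,0))).1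

-- ===== PRECONDITION & SPEC =====
-- Pre_check excludes ragged grids (a row shorter than the number of rows): there
-- the Python A raises IndexError unless it finds a run first, and B's full scan raises.
def Pre_check (grid : List (List String)) : Prop :=
  ∀ row ∈ grid, grid.length ≤ row.length
instance (grid : List (List String)) : Decidable (Pre_check grid) := by
  unfold Pre_check; infer_instance

def pvWitness_check : List (List String) := [["#", "#"], [".", "."]]

def Spec_check (grid : List (List String)) (out : Bool) : Prop := out = check_alt grid
instance (grid : List (List String)) (out : Bool) : Decidable (Spec_check grid out) := by
  unfold Spec_check; infer_instance

-- ===== CLAIM (what is proved, stated in full; the proofs are below) =====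
def Claim_equal_check : Prop :=
  ∀ (grid : List (List String)), Dom_check grid → Pre_check grid → Spec_check grid (check grid)

-- ===== LEMMAS AND PROOFS =====

-- cell-is-'#' test
def pvC (g : List (List String)) (i j : Nat) : Bool := pvCell g i j == "#"

-- run length ending at (i,j), going up
def pvVL (c : Nat → Nat → Bool) : Nat → Nat → Nat
  | 0, j => if c 0 j then 1 else 0
  | (i+1), j => if c (i+1) j then pvVL c i j + 1 else 0

-- run length ending at (i,j), going left
def pvHL (c : Nat → Nat → Bool) : Nat → Nat → Nat
  | i, 0 => if c i 0 then 1 else 0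
  | i, (j+1) => if c i (j+1) then pvHL c i j + 1 else 0

-- run length ending at (i,j), going up-left
def pvD1 (c : Nat → Nat → Bool) : Nat → Nat → Nat
  | 0, j => if c 0 j then 1 else 0
  | (i+1), 0 => if c (i+1) 0 then 1 else 0
  | (i+1), (j+1) => if c (i+1) (j+1) then pvD1 c i j + 1 else 0

-- run length ending at (i,j), going up-right, columns bounded by n
def pvD2 (c : Nat → Nat → Bool) (n : Nat) : Nat → Nat → Nat
  | 0, j => if c 0 j then 1 else 0
  | (i+1), j => if c (i+1) j then (if j + 1 < n then pvD2 c n i (j+1) else 0) + 1 else 0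

-- the counter triple the previous row hands to row i at column j
def pvPrev (c : Nat → Nat → Bool) (n : Nat) : Nat → Nat → Nat × Nat × Nat
  | 0, _ => (0, 0, 0)
  | (i+1), j => (pvVL c i j, pvD1 c i j, pvD2 c n i j)

-- some run of length ≥ 6 ends at (i,j)
def pvEnd6 (c : Nat → Nat → Bool) (n i j : Nat) : Bool :=
  decide (6 ≤ pvHL c i j) || (decide (6 ≤ pvVL c i j) ||
    (decide (6 ≤ pvD1 c i j) || decide (6 ≤ pvD2 c n i j)))

theorem pvVL_step (c : Nat → Nat → Bool) (n i j : Nat) :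
    pvVL c i j = if c i j then (pvPrev c n i j).1 + 1 else 0 := by
  cases i <;> simp [pvVL, pvPrev]

theorem pvD1_step (c : Nat → Nat → Bool) (n i j : Nat) :
    pvD1 c i j = if c i j then (if 0 < j then (pvPrev c n i (j-1)).2.1 else 0) + 1 else 0 := by
  cases i <;> cases j <;> simp [pvD1, pvPrev]

theorem pvD2_step (c : Nat → Nat → Bool) (n i j : Nat) :
    pvD2 c n i j = if c i j then (if j + 1 < n then (pvPrev c n i (j+1)).2.2 else 0) + 1 else 0 := by
  cases i <;> simp [pvD2, pvPrev]

theorem pvHL_step (c : Nat → Nat → Bool) (i j : Nat) :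
    pvHL c i j = if c i j then (if 0 < j then pvHL c i (j-1) else 0) + 1 else 0 := by
  cases j <;> simp [pvHL]

-- inner loop invariant
theorem pvDecide_lt_succ (P : Nat → Prop) [DecidablePred P] (m : Nat) :
    decide (∃ j, j < m + 1 ∧ P j) = (decide (∃ j, j < m ∧ P j) || decide (P m)) := by
  rw [← Bool.decide_or, decide_eq_decide]
  constructor
  · rintro ⟨j, hj, hp⟩
    rcases Nat.lt_succ_iff_lt_or_eq.mp hj with h | h
    · exact Or.inl ⟨j, h, hp⟩
    · subst h; exact Or.inr hp
  · rintro (⟨j, hj, hp⟩ | hp)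
    · exact ⟨j, by omega, hp⟩
    · exact ⟨m, by omega, hp⟩

theorem pvInner_spec (g : List (List String)) (n i : Nat) (prev : List (Nat × Nat × Nat))
    (hprev : ∀ j, j < n → prev.getD j (0,0,0) = pvPrev (pvC g) n i j)
    (m : Nat) (hm : m ≤ n) (f0 : Bool) :
    (List.range m).foldl (pvInner g n i prev) (f0, 0, []) =
      ((f0 || decide (∃ j, j < m ∧ pvEnd6 (pvC g) n i j = true)),
       (if 0 < m then pvHL (pvC g) i (m-1) else 0),
       (List.range m).map (fun j => (pvVL (pvC g) i j, pvD1 (pvC g) i j, pvD2 (pvC g) n i j))) := by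
  induction m with
  | zero => simp
  | succ m ih =>
    have hm' : m ≤ n := by omega
    have hmn : m < n := by omega
    rw [List.range_succ, List.foldl_append, ih hm']
    simp only [List.foldl_cons, List.foldl_nil, pvInner]
    rw [hprev m hmn, hprev (m-1) (by omega)]
    rw [pvDecide_lt_succ]
    rw [List.map_append]
    by_cases hc : pvC g i m = true
    · have hc' : (pvCell g i m == "#") = true := hc
      have eHL : pvHL (pvC g) i m = (if 0 < m then pvHL (pvC g) i (m-1) else 0) + 1 := by
        rw [pvHL_step (pvC g) i m, if_pos hc]
      have eVL : pvVL (pvC g) i m = (pvPrev (pvC g) n i m).1 + 1 := by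
        rw [pvVL_step (pvC g) n i m, if_pos hc]
      have eD1 : pvD1 (pvC g) i m =
          (if 0 < m then (pvPrev (pvC g) n i (m-1)).2.1 else 0) + 1 := by
        rw [pvD1_step (pvC g) n i m, if_pos hc]
      have eD2 : pvD2 (pvC g) n i m =
          (if m + 1 < n then (pvPrev (pvC g) n i (m+1)).2.2 else 0) + 1 := by
        rw [pvD2_step (pvC g) n i m, if_pos hc]
      by_cases hn : m + 1 < n
      · rw [hprev (m+1) hn]
        simp only [hc', if_pos, Prod.mk.injEq]
        refine ⟨?_, ?_, ?_⟩
        · rw [← eHL, ← eVL, ← eD1, ← eD2]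
          simp [pvEnd6, Bool.or_assoc, Bool.decide_or]
        · simp [eHL]
        · simp [eVL, eD1, eD2]
      · have hifn : ∀ x : Nat × Nat × Nat,
            (if m + 1 < n then x.2.2 else 0) = 0 := by intro x; rw [if_neg hn]
        simp only [hc', if_true, if_neg hn, Prod.mk.injEq]
        rw [if_neg hn] at eD2
        refine ⟨?_, ?_, ?_⟩
        · rw [← eHL, ← eVL, ← eD1, ← eD2]
          simp [pvEnd6, Bool.or_assoc, Bool.decide_or]
        · simp [eHL]
        · simp [eVL, eD1, eD2]
    · have hc' : (pvCell g i m == "#") = false := by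
        rw [← Bool.not_eq_true]; exact hc
      have eHL : pvHL (pvC g) i m = 0 := by
        rw [pvHL_step (pvC g) i m, if_neg hc]
      have eVL : pvVL (pvC g) i m = 0 := by
        rw [pvVL_step (pvC g) n i m, if_neg hc]
      have eD1 : pvD1 (pvC g) i m = 0 := by
        rw [pvD1_step (pvC g) n i m, if_neg hc]
      have eD2 : pvD2 (pvC g) n i m = 0 := by
        rw [pvD2_step (pvC g) n i m, if_neg hc]
      have hend : pvEnd6 (pvC g) n i m = false := by
        simp [pvEnd6, eHL, eVL, eD1, eD2]
      simp [hc', hend, eHL, eVL, eD1, eD2]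

-- outer loop invariant
theorem pvOuter_spec (g : List (List String)) (n m : Nat) :
    ((List.range m).foldl (pvOuter g n) (false, List.replicate n (0,0,0))).1 =
      decide (∃ i, i < m ∧ ∃ j, j < n ∧ pvEnd6 (pvC g) n i j = true) ∧
    ∀ j, j < n →
      ((List.range m).foldl (pvOuter g n) (false, List.replicate n (0,0,0))).2.getD j (0,0,0) =
        pvPrev (pvC g) n m j := by
  induction m with
  | zero =>
    constructor
    · simp
    · intro j hj
      simp [List.getD, pvPrev, hj]
  | succ m ih =>
    obtain ⟨h1, h2⟩ := ih
    rw [List.range_succ, List.foldl_append]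
    simp only [List.foldl_cons, List.foldl_nil]
    rw [pvOuter]
    rw [pvInner_spec g n m _ h2 n (le_refl n)]
    constructor
    · rw [h1, pvDecide_lt_succ (fun i => ∃ j, j < n ∧ pvEnd6 (pvC g) n i j = true) m]
    · intro j hj
      simp [List.getD_eq_getElem?_getD, hj, pvPrev]

theorem check_alt_eq (g : List (List String)) :
    check_alt g = decide (∃ i, i < g.length ∧ ∃ j, j < g.length ∧
      pvEnd6 (pvC g) g.length i j = true) := by
  unfold check_alt
  exact (pvOuter_spec g g.length g.length).1

theorem check_eq (g : List (List String)) :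
    check g = decide (∃ i, i < g.length ∧ ∃ j, j < g.length ∧ pvHitA g g.length i j = true) := by
  apply Bool.eq_iff_iff.mpr
  simp [check, List.any_eq_true, List.mem_range]

-- characterisations of "a run of length m+1 ends at (i,j)"
theorem pvVL_iff (c : Nat → Nat → Bool) (m : Nat) : ∀ (i j : Nat),
    m + 1 ≤ pvVL c i j ↔ m ≤ i ∧ ∀ k, k ≤ m → c (i-k) j = true := by
  induction m with
  | zero =>
    intro i j
    cases i with
    | zero => by_cases hc : c 0 j = true <;> simp [pvVL, hc]
    | succ i' => by_cases hc : c (i'+1) j = true <;> simp [pvVL, hc]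
  | succ m ih =>
    intro i j
    cases i with
    | zero =>
      by_cases hc : c 0 j = true <;> simp [pvVL, hc]
    | succ i' =>
      by_cases hc : c (i'+1) j = true
      case neg =>
        rw [show pvVL c (i'+1) j = if c (i'+1) j then pvVL c i' j + 1 else 0 from rfl, if_neg hc]
        constructor
        · intro h; omega
        · rintro ⟨-, hall⟩
          have h0 := hall 0 (by omega)
          rw [Nat.sub_zero] at h0
          exact absurd h0 hc
      case pos =>
        rw [show pvVL c (i'+1) j = if c (i'+1) j then pvVL c i' j + 1 else 0 from rfl, if_pos hc]
        constructor
        · intro h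
          obtain ⟨hmi, hall⟩ := (ih i' j).mp (by omega)
          refine ⟨by omega, ?_⟩
          intro k hk
          cases k with
          | zero => simpa using hc
          | succ k' =>
            have h' := hall k' (by omega)
            rwa [show i' + 1 - (k'+1) = i' - k' by omega]
        · rintro ⟨hmi, hall⟩
          have h' : m + 1 ≤ pvVL c i' j := by
            refine (ih i' j).mpr ⟨by omega, ?_⟩
            intro k hk
            have h'' := hall (k+1) (by omega)
            rwa [show i' + 1 - (k+1) = i' - k by omega] at h''
          omega

theorem pvHL_iff (c : Nat → Nat → Bool) (m : Nat) : ∀ (i j : Nat),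
    m + 1 ≤ pvHL c i j ↔ m ≤ j ∧ ∀ k, k ≤ m → c i (j-k) = true := by
  induction m with
  | zero =>
    intro i j
    cases j with
    | zero => by_cases hc : c i 0 = true <;> simp [pvHL, hc]
    | succ j' => by_cases hc : c i (j'+1) = true <;> simp [pvHL, hc]
  | succ m ih =>
    intro i j
    cases j with
    | zero =>
      by_cases hc : c i 0 = true <;> simp [pvHL, hc]
    | succ j' =>
      by_cases hc : c i (j'+1) = true
      case neg =>
        rw [show pvHL c i (j'+1) = if c i (j'+1) then pvHL c i j' + 1 else 0 from rfl, if_neg hc]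
        constructor
        · intro h; omega
        · rintro ⟨-, hall⟩
          have h0 := hall 0 (by omega)
          rw [Nat.sub_zero] at h0
          exact absurd h0 hc
      case pos =>
        rw [show pvHL c i (j'+1) = if c i (j'+1) then pvHL c i j' + 1 else 0 from rfl, if_pos hc]
        constructor
        · intro h
          obtain ⟨hmj, hall⟩ := (ih i j').mp (by omega)
          refine ⟨by omega, ?_⟩
          intro k hk
          cases k with
          | zero => simpa using hc
          | succ k' =>
            have h' := hall k' (by omega)
            rwa [show j' + 1 - (k'+1) = j' - k' by omega]
        · rintro ⟨hmj, hall⟩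
          have h' : m + 1 ≤ pvHL c i j' := by
            refine (ih i j').mpr ⟨by omega, ?_⟩
            intro k hk
            have h'' := hall (k+1) (by omega)
            rwa [show j' + 1 - (k+1) = j' - k by omega] at h''
          omega

theorem pvD1_iff (c : Nat → Nat → Bool) (m : Nat) : ∀ (i j : Nat),
    m + 1 ≤ pvD1 c i j ↔ m ≤ i ∧ m ≤ j ∧ ∀ k, k ≤ m → c (i-k) (j-k) = true := by
  induction m with
  | zero =>
    intro i j
    cases i with
    | zero => by_cases hc : c 0 j = true <;> simp [pvD1, hc]
    | succ i' =>
      cases j with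
      | zero => by_cases hc : c (i'+1) 0 = true <;> simp [pvD1, hc]
      | succ j' => by_cases hc : c (i'+1) (j'+1) = true <;> simp [pvD1, hc]
  | succ m ih =>
    intro i j
    cases i with
    | zero =>
      by_cases hc : c 0 j = true <;> simp [pvD1, hc]
    | succ i' =>
      cases j with
      | zero =>
        by_cases hc : c (i'+1) 0 = true <;> simp [pvD1, hc]
      | succ j' =>
        by_cases hc : c (i'+1) (j'+1) = true
        case neg =>
          rw [show pvD1 c (i'+1) (j'+1) =
                if c (i'+1) (j'+1) then pvD1 c i' j' + 1 else 0 from rfl, if_neg hc]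
          constructor
          · intro h; omega
          · rintro ⟨-, -, hall⟩
            have h0 := hall 0 (by omega)
            rw [Nat.sub_zero, Nat.sub_zero] at h0
            exact absurd h0 hc
        case pos =>
          rw [show pvD1 c (i'+1) (j'+1) =
                if c (i'+1) (j'+1) then pvD1 c i' j' + 1 else 0 from rfl, if_pos hc]
          constructor
          · intro h
            obtain ⟨hmi, hmj, hall⟩ := (ih i' j').mp (by omega)
            refine ⟨by omega, by omega, ?_⟩
            intro k hk
            cases k with
            | zero => simpa using hc
            | succ k' =>
              have h' := hall k' (by omega)
              rwa [show i' + 1 - (k'+1) = i' - k' by omega,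
                   show j' + 1 - (k'+1) = j' - k' by omega]
          · rintro ⟨hmi, hmj, hall⟩
            have h' : m + 1 ≤ pvD1 c i' j' := by
              refine (ih i' j').mpr ⟨by omega, by omega, ?_⟩
              intro k hk
              have h'' := hall (k+1) (by omega)
              rwa [show i' + 1 - (k+1) = i' - k by omega,
                   show j' + 1 - (k+1) = j' - k by omega] at h''
            omega

theorem pvD2_iff (c : Nat → Nat → Bool) (n : Nat) (m : Nat) : ∀ (i j : Nat),
    m + 1 ≤ pvD2 c n i j ↔ m ≤ i ∧ (∀ k, 1 ≤ k → k ≤ m → j + k < n) ∧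
      ∀ k, k ≤ m → c (i-k) (j+k) = true := by
  induction m with
  | zero =>
    intro i j
    cases i with
    | zero => by_cases hc : c 0 j = true <;> simp [pvD2, hc] <;> omega
    | succ i' => by_cases hc : c (i'+1) j = true <;> simp [pvD2, hc] <;> omega
  | succ m ih =>
    intro i j
    cases i with
    | zero =>
      by_cases hc : c 0 j = true <;> simp [pvD2, hc]
    | succ i' =>
      by_cases hc : c (i'+1) j = true
      case neg =>
        rw [show pvD2 c n (i'+1) j =
              if c (i'+1) j then (if j + 1 < n then pvD2 c n i' (j+1) else 0) + 1 else 0 from rfl,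
            if_neg hc]
        constructor
        · intro h; omega
        · rintro ⟨-, -, hall⟩
          have h0 := hall 0 (by omega)
          rw [Nat.sub_zero, Nat.add_zero] at h0
          exact absurd h0 hc
      case pos =>
        rw [show pvD2 c n (i'+1) j =
              if c (i'+1) j then (if j + 1 < n then pvD2 c n i' (j+1) else 0) + 1 else 0 from rfl,
            if_pos hc]
        by_cases hn : j + 1 < n
        case neg =>
          rw [if_neg hn]
          constructor
          · intro h; omega
          · rintro ⟨-, hg, -⟩
            exact absurd (hg 1 (by omega) (by omega)) hn
        case pos =>
          rw [if_pos hn]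
          constructor
          · intro h
            obtain ⟨hmi, hg, hall⟩ := (ih i' (j+1)).mp (by omega)
            refine ⟨by omega, ?_, ?_⟩
            · intro k h1k hk
              cases k with
              | zero => omega
              | succ k' =>
                cases k' with
                | zero => simpa using hn
                | succ k'' =>
                  have := hg (k''+1) (by omega) (by omega)
                  omega
            · intro k hk
              cases k with
              | zero => simpa using hc
              | succ k' =>
                have h' := hall k' (by omega)
                rwa [show i' + 1 - (k'+1) = i' - k' by omega,
                     show j + (k'+1) = j + 1 + k' by omega]
          · rintro ⟨hmi, hg, hall⟩
            have h' : m + 1 ≤ pvD2 c n i' (j+1) := by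
              refine (ih i' (j+1)).mpr ⟨by omega, ?_, ?_⟩
              · intro k h1k hk
                have := hg (k+1) (by omega) (by omega)
                omega
              · intro k hk
                have h'' := hall (k+1) (by omega)
                rwa [show i' + 1 - (k+1) = i' - k by omega,
                     show j + (k+1) = j + 1 + k by omega] at h''
            omega

theorem pvHitA_iff (g : List (List String)) (n i j : Nat) :
    pvHitA g n i j = true ↔
      pvC g i j = true ∧
      ((i+5 < n ∧ pvC g (i+1) j = true ∧ pvC g (i+2) j = true ∧ pvC g (i+3) j = true ∧
          pvC g (i+4) j = true ∧ pvC g (i+5) j = true) ∨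
       (j+5 < n ∧ pvC g i (j+1) = true ∧ pvC g i (j+2) = true ∧ pvC g i (j+3) = true ∧
          pvC g i (j+4) = true ∧ pvC g i (j+5) = true) ∨
       (i+5 < n ∧ j+5 < n ∧ pvC g (i+1) (j+1) = true ∧ pvC g (i+2) (j+2) = true ∧
          pvC g (i+3) (j+3) = true ∧ pvC g (i+4) (j+4) = true ∧ pvC g (i+5) (j+5) = true) ∨
       (i+5 < n ∧ 5 ≤ j ∧ pvC g (i+1) (j-1) = true ∧ pvC g (i+2) (j-2) = true ∧
          pvC g (i+3) (j-3) = true ∧ pvC g (i+4) (j-4) = true ∧ pvC g (i+5) (j-5) = true)) := by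
  unfold pvHitA pvC
  split_ifs with h1 h2 h3 h4 h5 <;> simp_all

theorem pvMain (g : List (List String)) (n : Nat) :
    (∃ i, i < n ∧ ∃ j, j < n ∧ pvHitA g n i j = true) ↔
    (∃ i, i < n ∧ ∃ j, j < n ∧ pvEnd6 (pvC g) n i j = true) := by
  constructor
  · rintro ⟨i, hi, j, hj, hhit⟩
    rw [pvHitA_iff] at hhit
    obtain ⟨hc, hdir⟩ := hhit
    rcases hdir with ⟨h5, h1, h2, h3, h4, hh5⟩ | ⟨h5, h1, h2, h3, h4, hh5⟩ |
      ⟨hi5, hj5, h1, h2, h3, h4, hh5⟩ | ⟨hi5, hj5, h1, h2, h3, h4, hh5⟩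
    · -- vertical run starting at (i,j): ends at (i+5, j)
      refine ⟨i+5, h5, j, hj, ?_⟩
      simp only [pvEnd6, Bool.or_eq_true, decide_eq_true_eq]
      refine Or.inr (Or.inl ?_)
      have h6 : 5 + 1 ≤ pvVL (pvC g) (i+5) j := by
        refine (pvVL_iff (pvC g) 5 (i+5) j).mpr ⟨by omega, ?_⟩
        intro k hk
        interval_cases k
        · simpa using hh5
        · rw [show i+5-1 = i+4 by omega]; exact h4
        · rw [show i+5-2 = i+3 by omega]; exact h3
        · rw [show i+5-3 = i+2 by omega]; exact h2
        · rw [show i+5-4 = i+1 by omega]; exact h1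
        · rw [show i+5-5 = i by omega]; exact hc
      omega
    · -- horizontal run starting at (i,j): ends at (i, j+5)
      refine ⟨i, hi, j+5, h5, ?_⟩
      simp only [pvEnd6, Bool.or_eq_true, decide_eq_true_eq]
      refine Or.inl ?_
      have h6 : 5 + 1 ≤ pvHL (pvC g) i (j+5) := by
        refine (pvHL_iff (pvC g) 5 i (j+5)).mpr ⟨by omega, ?_⟩
        intro k hk
        interval_cases k
        · simpa using hh5
        · rw [show j+5-1 = j+4 by omega]; exact h4
        · rw [show j+5-2 = j+3 by omega]; exact h3
        · rw [show j+5-3 = j+2 by omega]; exact h2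
        · rw [show j+5-4 = j+1 by omega]; exact h1
        · rw [show j+5-5 = j by omega]; exact hc
      omega
    · -- down-right diagonal starting at (i,j): ends at (i+5, j+5)
      refine ⟨i+5, hi5, j+5, hj5, ?_⟩
      simp only [pvEnd6, Bool.or_eq_true, decide_eq_true_eq]
      refine Or.inr (Or.inr (Or.inl ?_))
      have h6 : 5 + 1 ≤ pvD1 (pvC g) (i+5) (j+5) := by
        refine (pvD1_iff (pvC g) 5 (i+5) (j+5)).mpr ⟨by omega, by omega, ?_⟩
        intro k hk
        interval_cases k
        · simpa using hh5
        · rw [show i+5-1 = i+4 by omega, show j+5-1 = j+4 by omega]; exact h4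
        · rw [show i+5-2 = i+3 by omega, show j+5-2 = j+3 by omega]; exact h3
        · rw [show i+5-3 = i+2 by omega, show j+5-3 = j+2 by omega]; exact h2
        · rw [show i+5-4 = i+1 by omega, show j+5-4 = j+1 by omega]; exact h1
        · rw [show i+5-5 = i by omega, show j+5-5 = j by omega]; exact hc
      omega
    · -- down-left diagonal starting at (i,j): ends at (i+5, j-5)
      refine ⟨i+5, hi5, j-5, by omega, ?_⟩
      simp only [pvEnd6, Bool.or_eq_true, decide_eq_true_eq]
      refine Or.inr (Or.inr (Or.inr ?_))
      have h6 : 5 + 1 ≤ pvD2 (pvC g) n (i+5) (j-5) := by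
        refine (pvD2_iff (pvC g) n 5 (i+5) (j-5)).mpr ⟨by omega, by omega, ?_⟩
        intro k hk
        interval_cases k
        · simpa using hh5
        · rw [show i+5-1 = i+4 by omega, show j-5+1 = j-4 by omega]; exact h4
        · rw [show i+5-2 = i+3 by omega, show j-5+2 = j-3 by omega]; exact h3
        · rw [show i+5-3 = i+2 by omega, show j-5+3 = j-2 by omega]; exact h2
        · rw [show i+5-4 = i+1 by omega, show j-5+4 = j-1 by omega]; exact h1
        · rw [show i+5-5 = i by omega, show j-5+5 = j by omega]; exact hc
      omega
  · rintro ⟨i, hi, j, hj, hend⟩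
    simp only [pvEnd6, Bool.or_eq_true, decide_eq_true_eq] at hend
    rcases hend with hH | hV | hD1 | hD2
    · -- horizontal run ending at (i,j): starts at (i, j-5)
      obtain ⟨h5j, hall⟩ := (pvHL_iff (pvC g) 5 i j).mp (by omega)
      refine ⟨i, hi, j-5, by omega, ?_⟩
      rw [pvHitA_iff]
      refine ⟨hall 5 (by omega),
        Or.inr (Or.inl ⟨by omega, ?_, ?_, ?_, ?_, ?_⟩)⟩
      · rw [show j-5+1 = j-4 by omega]; exact hall 4 (by omega)
      · rw [show j-5+2 = j-3 by omega]; exact hall 3 (by omega)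
      · rw [show j-5+3 = j-2 by omega]; exact hall 2 (by omega)
      · rw [show j-5+4 = j-1 by omega]; exact hall 1 (by omega)
      · rw [show j-5+5 = j by omega]; simpa using hall 0 (by omega)
    · -- vertical run ending at (i,j): starts at (i-5, j)
      obtain ⟨h5i, hall⟩ := (pvVL_iff (pvC g) 5 i j).mp (by omega)
      refine ⟨i-5, by omega, j, hj, ?_⟩
      rw [pvHitA_iff]
      refine ⟨hall 5 (by omega), Or.inl ⟨by omega, ?_, ?_, ?_, ?_, ?_⟩⟩
      · rw [show i-5+1 = i-4 by omega]; exact hall 4 (by omega)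
      · rw [show i-5+2 = i-3 by omega]; exact hall 3 (by omega)
      · rw [show i-5+3 = i-2 by omega]; exact hall 2 (by omega)
      · rw [show i-5+4 = i-1 by omega]; exact hall 1 (by omega)
      · rw [show i-5+5 = i by omega]; simpa using hall 0 (by omega)
    · -- down-right diagonal ending at (i,j): starts at (i-5, j-5)
      obtain ⟨h5i, h5j, hall⟩ := (pvD1_iff (pvC g) 5 i j).mp (by omega)
      refine ⟨i-5, by omega, j-5, by omega, ?_⟩
      rw [pvHitA_iff]
      refine ⟨hall 5 (by omega), Or.inr (Or.inr (Or.inl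
        ⟨by omega, by omega, ?_, ?_, ?_, ?_, ?_⟩))⟩
      · rw [show i-5+1 = i-4 by omega, show j-5+1 = j-4 by omega]; exact hall 4 (by omega)
      · rw [show i-5+2 = i-3 by omega, show j-5+2 = j-3 by omega]; exact hall 3 (by omega)
      · rw [show i-5+3 = i-2 by omega, show j-5+3 = j-2 by omega]; exact hall 2 (by omega)
      · rw [show i-5+4 = i-1 by omega, show j-5+4 = j-1 by omega]; exact hall 1 (by omega)
      · rw [show i-5+5 = i by omega, show j-5+5 = j by omega]; simpa using hall 0 (by omega)
    · -- up-right diagonal ending at (i,j): the down-left run starts at (i-5, j+5)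
      obtain ⟨h5i, hg, hall⟩ := (pvD2_iff (pvC g) n 5 i j).mp (by omega)
      have hj5 : j + 5 < n := hg 5 (by omega) (by omega)
      refine ⟨i-5, by omega, j+5, hj5, ?_⟩
      rw [pvHitA_iff]
      refine ⟨hall 5 (by omega), Or.inr (Or.inr (Or.inr
        ⟨by omega, by omega, ?_, ?_, ?_, ?_, ?_⟩))⟩
      · rw [show i-5+1 = i-4 by omega, show j+5-1 = j+4 by omega]; exact hall 4 (by omega)
      · rw [show i-5+2 = i-3 by omega, show j+5-2 = j+3 by omega]; exact hall 3 (by omega)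
      · rw [show i-5+3 = i-2 by omega, show j+5-3 = j+2 by omega]; exact hall 2 (by omega)
      · rw [show i-5+4 = i-1 by omega, show j+5-4 = j+1 by omega]; exact hall 1 (by omega)
      · rw [show i-5+5 = i by omega, show j+5-5 = j by omega]; simpa using hall 0 (by omega)

-- ===== VERDICT (by name: the statement is the Claim_ definition above) =====
theorem check_spec : Claim_equal_check := by
  intro g _ _
  unfold Spec_check
  rw [check_eq, check_alt_eq]
  exact decide_eq_decide.mpr (pvMain g g.length)
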